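-- pv_equiv track=rewrite | github.com/idea-iitd/Grail | src/parallel_test.py | assign_labels_based_on_features
-- ===== SOURCE A (Python) =====
-- def assign_labels_based_on_features(nftrs1,nftrs2):
--     labels = {}  # Dictionary to store unique feature-to-label mapping
--     node_labels1 = []  # Dictionary to store node index to label mapping
--     node_labels2 = []
--     current_label_index = 0  # Tracks the next label to assign
--
--     # Alphabet list for labeling
--     alphabet = [chr(ord('a') + i) for i in range(26)]  # 'a', 'b', ..., 'z'
--
--     # If more than 26 labels are needed, extend the alphabet (aa, ab, etc.)
--     z=len(nftrs1)+len(nftrs2)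
--     while len(alphabet) < z :
--         alphabet += [a + b for a in alphabet for b in alphabet][:z - len(alphabet)]
--
--     node_labels1, node_labels2 = [], []
--
--
--     for i, features in enumerate(nftrs1):
--         features_tuple = tuple(features)  # Convert features to a tuple to make it hashable
--         if features_tuple==(-1,):
--            node_labels1.append("eps")
--         else:
--         # Check if features already have an assigned label
--           if features_tuple in labels:
--             node_labels1.append(labels[features_tuple])  # Assign existing label
--           else:
--               # Assign a new label
--               labels[features_tuple] = alphabet[current_label_index]
--               node_labels1.append(alphabet[current_label_index])
--               current_label_index += 1
--
--     for i, features in enumerate(nftrs2):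
--         features_tuple = tuple(features)  # Convert features to a tuple to make it hashable
--
--         if features_tuple==(-1,):
--            node_labels2.append("eps")
--         # Check if features already have an assigned label
--         else:
--            if features_tuple in labels:
--             node_labels2.append(labels[features_tuple])  # Assign existing label
--            else:
--             labels[features_tuple] = alphabet[current_label_index]
--             node_labels2.append(alphabet[current_label_index])
--             current_label_index += 1
--
--     return node_labels1, node_labels2
-- ===== SOURCE B (Python) =====
-- def assign_labels_based_on_features(nftrs1, nftrs2):
--     # Alphabet built exactly as in the original (including its extension rule).
--     alphabet = [chr(ord('a') + i) for i in range(26)]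
--     z = len(nftrs1) + len(nftrs2)
--     while len(alphabet) < z:
--         alphabet += [a + b for a in alphabet for b in alphabet][:z - len(alphabet)]
--
--     # Pass 1: build the label table only (first appearance over nftrs1 then nftrs2).
--     labels = {}
--     k = 0
--     for features in nftrs1 + nftrs2:
--         t = tuple(features)
--         if t != (-1,) and t not in labels:
--             labels[t] = alphabet[k]
--             k += 1
--
--     # Pass 2: produce each output list by pure lookup in the finished table.
--     def lab(features):
--         t = tuple(features)
--         return "eps" if t == (-1,) else labels[t]
--
--     return [lab(f) for f in nftrs1], [lab(f) for f in nftrs2]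
-- ===== Notes on version B (the rewrite author's own statement) =====
-- stated objective: alternative
-- what changed: B separates table construction from output construction: one fold over nftrs1+nftrs2 builds only the first-appearance label dict, then each output list is produced by a pure map/lookup over the finished table, instead of A's two loops that interleave assigning labels with appending outputs.
import Mathlib
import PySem

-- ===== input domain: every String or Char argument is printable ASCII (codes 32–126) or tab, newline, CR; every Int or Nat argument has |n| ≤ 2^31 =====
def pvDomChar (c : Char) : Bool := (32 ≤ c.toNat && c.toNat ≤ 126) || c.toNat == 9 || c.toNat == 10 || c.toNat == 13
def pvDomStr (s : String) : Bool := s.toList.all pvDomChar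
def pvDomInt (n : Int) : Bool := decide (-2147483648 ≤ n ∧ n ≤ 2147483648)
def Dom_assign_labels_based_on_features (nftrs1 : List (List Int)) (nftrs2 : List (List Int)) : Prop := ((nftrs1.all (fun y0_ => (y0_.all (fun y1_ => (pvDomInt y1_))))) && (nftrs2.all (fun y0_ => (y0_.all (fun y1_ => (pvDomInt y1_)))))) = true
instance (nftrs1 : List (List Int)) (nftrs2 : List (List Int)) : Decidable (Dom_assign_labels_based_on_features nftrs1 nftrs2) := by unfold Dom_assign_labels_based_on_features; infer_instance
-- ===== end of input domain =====

-- B separates building the first-appearance label table (one fold over nftrs1+nftrs2)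
-- from producing the two output lists (pure map/lookup in the finished table); objective: alternative decomposition, same cost.

-- ===== PORT A =====
-- shared alphabet code: both Pythons contain the identical alphabet-building block.
-- chr(ord('a') + i) for i in range(26)
def pvBaseAlphabet : List String :=
  (List.range 26).map (fun i => String.ofList [Char.ofNat ('a'.toNat + i)])

-- while len(alphabet) < z: alphabet += [a+b for a in alphabet for b in alphabet][:z-len(alphabet)]
-- Fuel only makes the loop total: the alphabet starts at 26 entries and each executed iteration
-- appends at least one entry (the slice bound z - len is positive inside the loop and the product
-- list is nonempty), so z.toNat iterations always suffice; the slice [:n] with n > 0 is List.take n.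
def pvGrowLoop : Nat → Int → List String → List String
  | 0, _, al => al
  | fuel + 1, z, al =>
      if (al.length : Int) < z then
        pvGrowLoop fuel z
          (al ++ (al.flatMap (fun a => al.map (fun b => a ++ b))).take (z - (al.length : Int)).toNat)
      else al

def pvBuildAlphabet (z : Int) : List String := pvGrowLoop z.toNat z pvBaseAlphabet

-- one step of A's per-list loop; state = (labels, node_labels so far, current_label_index).
-- alphabet[current_label_index]: the index is always in range when reached (at most
-- len(nftrs1)+len(nftrs2) labels are ever assigned and the alphabet has at least that many
-- entries), so pyGetD with a dummy default is exact here.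
def pvStepA (alpha : List String)
    (s : PySem.Dict (List Int) String × List String × Int) (x : List Int) :
    PySem.Dict (List Int) String × List String × Int :=
  if x = [-1] then (s.1, s.2.1 ++ ["eps"], s.2.2)
  else
    match s.1.get? x with
    | some v => (s.1, s.2.1 ++ [v], s.2.2)
    | none =>
        let lbl := PySem.List.pyGetD alpha s.2.2 ""
        (s.1.insert x lbl, s.2.1 ++ [lbl], s.2.2 + 1)

def assign_labels_based_on_features (nftrs1 : List (List Int)) (nftrs2 : List (List Int)) :
    List String × List String :=
  let alpha := pvBuildAlphabet ((nftrs1.length : Int) + (nftrs2.length : Int))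
  let r1 := nftrs1.foldl (pvStepA alpha) (PySem.Dict.empty, [], 0)
  let r2 := nftrs2.foldl (pvStepA alpha) (r1.1, [], r1.2.2)
  (r1.2.1, r2.2.1)

-- ===== PORT B =====
-- table-building step of B; state = (labels, next label index); no output is produced here.
def pvStepT (alpha : List String)
    (s : PySem.Dict (List Int) String × Int) (x : List Int) :
    PySem.Dict (List Int) String × Int :=
  if x = [-1] then s
  else if s.1.contains x then s
  else (s.1.insert x (PySem.List.pyGetD alpha s.2 ""), s.2 + 1)

-- B's lab(): "eps" for (-1,), else labels[t]; the key is always present in the finished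
-- table (every non-eps tuple of either list was inserted), so getD with a dummy default is exact.
def pvLab (d : PySem.Dict (List Int) String) (x : List Int) : String :=
  if x = [-1] then "eps" else d.getD x ""

def assign_labels_based_on_features_alt (nftrs1 : List (List Int)) (nftrs2 : List (List Int)) :
    List String × List String :=
  let alpha := pvBuildAlphabet ((nftrs1.length : Int) + (nftrs2.length : Int))
  let d := ((nftrs1 ++ nftrs2).foldl (pvStepT alpha) (PySem.Dict.empty, 0)).1
  (nftrs1.map (pvLab d), nftrs2.map (pvLab d))

-- ===== PRECONDITION & SPEC =====
def Spec_assign_labels_based_on_features (nftrs1 : List (List Int)) (nftrs2 : List (List Int)) (out : List String × List String) : Prop := out = assign_labels_based_on_features_alt nftrs1 nftrs2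
instance (nftrs1 : List (List Int)) (nftrs2 : List (List Int)) (out : List String × List String) : Decidable (Spec_assign_labels_based_on_features nftrs1 nftrs2 out) := by unfold Spec_assign_labels_based_on_features; infer_instance

-- ===== CLAIM (what is proved, stated in full; the proofs are below) =====
def Claim_equal_assign_labels_based_on_features : Prop := ∀ (nftrs1 : List (List Int)) (nftrs2 : List (List Int)), Dom_assign_labels_based_on_features nftrs1 nftrs2 → Spec_assign_labels_based_on_features nftrs1 nftrs2 (assign_labels_based_on_features nftrs1 nftrs2)

-- ===== LEMMAS AND PROOFS =====

-- the table only grows: one step preserves every existing binding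
theorem pvStepT_mono (alpha : List String) (s : PySem.Dict (List Int) String × Int)
    (x a : List Int) (v : String) (h : s.1.get? a = some v) :
    (pvStepT alpha s x).1.get? a = some v := by
  unfold pvStepT
  split_ifs with h1 h2
  · exact h
  · exact h
  · have hne : a ≠ x := by
      intro he
      rw [he] at h
      have := (PySem.Dict.get?_eq_none_iff_contains (d := s.1) (k := x)).mpr (by
        simpa using h2)
      simp [this] at h
    simpa [PySem.Dict.get?_insert_of_ne _ _ hne] using h

theorem pvFoldT_mono (alpha : List String) (xs : List (List Int))
    (s : PySem.Dict (List Int) String × Int) (a : List Int) (v : String)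
    (h : s.1.get? a = some v) :
    (xs.foldl (pvStepT alpha) s).1.get? a = some v := by
  induction xs generalizing s with
  | nil => simpa using h
  | cons x xs ih =>
      simp only [List.foldl_cons]
      exact ih _ (pvStepT_mono alpha s x a v h)

-- A's per-list loop = table fold + map through any table that extends the fold's table
theorem pvFoldA_eq (alpha : List String) (xs : List (List Int))
    (s : PySem.Dict (List Int) String × Int) (o0 : List String)
    (d' : PySem.Dict (List Int) String)
    (hd : ∀ a v, (xs.foldl (pvStepT alpha) s).1.get? a = some v → d'.get? a = some v) :
    xs.foldl (pvStepA alpha) (s.1, o0, s.2) =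
      ((xs.foldl (pvStepT alpha) s).1, o0 ++ xs.map (pvLab d'),
        (xs.foldl (pvStepT alpha) s).2) := by
  induction xs generalizing s o0 with
  | nil => simp
  | cons x xs ih =>
      simp only [List.foldl_cons, List.map_cons] at hd ⊢
      by_cases hx : x = [-1]
      · have hT : pvStepT alpha s x = s := by simp [pvStepT, hx]
        have hA : pvStepA alpha (s.1, o0, s.2) x = (s.1, o0 ++ ["eps"], s.2) := by
          simp [pvStepA, hx]
        rw [hT] at hd
        rw [hA, hT]
        rw [ih s (o0 ++ ["eps"]) hd]
        simp [pvLab, hx]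
      · cases hg : s.1.get? x with
        | some v =>
            have hc : s.1.contains x := by
              by_contra hcf
              have := (PySem.Dict.get?_eq_none_iff_contains s.1 x).mpr (by simpa using hcf)
              simp [this] at hg
            have hT : pvStepT alpha s x = s := by simp [pvStepT, hx, hc]
            have hA : pvStepA alpha (s.1, o0, s.2) x = (s.1, o0 ++ [v], s.2) := by
              simp [pvStepA, hx, hg]
            rw [hT] at hd
            rw [hA, hT]
            rw [ih s (o0 ++ [v]) hd]
            have hdx : d'.get? x = some v :=
              hd x v (pvFoldT_mono alpha xs s x v hg)
            simp [pvLab, hx, PySem.Dict.getD_of_get?_eq_some d' "" hdx]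
        | none =>
            have hc : s.1.contains x = false :=
              (PySem.Dict.get?_eq_none_iff_contains s.1 x).mp hg
            have hT : pvStepT alpha s x =
                (s.1.insert x (PySem.List.pyGetD alpha s.2 ""), s.2 + 1) := by
              simp [pvStepT, hx, hc]
            have hA : pvStepA alpha (s.1, o0, s.2) x =
                (s.1.insert x (PySem.List.pyGetD alpha s.2 ""),
                  o0 ++ [PySem.List.pyGetD alpha s.2 ""], s.2 + 1) := by
              simp [pvStepA, hx, hg]
            rw [hT] at hd
            rw [hA, hT]
            rw [ih (s.1.insert x (PySem.List.pyGetD alpha s.2 ""), s.2 + 1)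
              (o0 ++ [PySem.List.pyGetD alpha s.2 ""]) hd]
            have hdx : d'.get? x = some (PySem.List.pyGetD alpha s.2 "") :=
              hd x _ (pvFoldT_mono alpha xs _ x _ (by simp [PySem.Dict.get?_insert_self]))
            simp [pvLab, hx, PySem.Dict.getD_of_get?_eq_some d' "" hdx]

-- ===== VERDICT (by name: the statement is the Claim_ definition above) =====
theorem assign_labels_based_on_features_spec : Claim_equal_assign_labels_based_on_features := by
  intro n1 n2 _
  unfold Spec_assign_labels_based_on_features
  unfold assign_labels_based_on_features assign_labels_based_on_features_alt
  simp only [List.foldl_append]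
  have h1 := pvFoldA_eq (pvBuildAlphabet ((n1.length : Int) + (n2.length : Int))) n1
    ((PySem.Dict.empty : PySem.Dict (List Int) String), (0 : Int)) []
    (n2.foldl (pvStepT (pvBuildAlphabet ((n1.length : Int) + (n2.length : Int))))
      (n1.foldl (pvStepT (pvBuildAlphabet ((n1.length : Int) + (n2.length : Int))))
        (PySem.Dict.empty, 0))).1
    (fun a v h => pvFoldT_mono _ n2 _ a v h)
  have h2 := pvFoldA_eq (pvBuildAlphabet ((n1.length : Int) + (n2.length : Int))) n2
    (n1.foldl (pvStepT (pvBuildAlphabet ((n1.length : Int) + (n2.length : Int))))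
      (PySem.Dict.empty, 0)) []
    (n2.foldl (pvStepT (pvBuildAlphabet ((n1.length : Int) + (n2.length : Int))))
      (n1.foldl (pvStepT (pvBuildAlphabet ((n1.length : Int) + (n2.length : Int))))
        (PySem.Dict.empty, 0))).1
    (fun a v h => h)
  dsimp only at h1 h2
  rw [h1]
  dsimp only
  rw [h2]
  simp
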